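-- pv_equiv track=rewrite | github.com/sungw00ng/solved | 오답노트/숫자짝꿍/100점.py | solution
-- ===== SOURCE A (Python) =====
-- def solution(X, Y):
--     answer = []
--
--     # 각 문자에 대해 반복하여 Y에서 제거
--     for i in sorted(set(X), reverse=True):
--         if i in Y:
--             # X와 Y에서 공통된 최소 횟수만큼 추가
--             common_count = min(X.count(i), Y.count(i))
--             answer.extend([i] * common_count)
--             Y = Y.replace(i, "", common_count)
--
--     # 일치안하는 경우
--     if not answer:
--         return "-1"
--
--     # 하나의 0 반환
--     if all(i == '0' for i in answer):
--         return "0"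
--
--     # 내림차순으로 정렬
--     answer.sort(reverse=True)
--     return ''.join(answer)
-- ===== SOURCE B (Python) =====
-- def solution(X, Y):
--     xs = sorted(X, reverse=True)
--     ys = sorted(Y, reverse=True)
--     out = []
--     i = j = 0
--     while i < len(xs) and j < len(ys):
--         a, b = xs[i], ys[j]
--         if a == b:
--             out.append(a)
--             i += 1
--             j += 1
--         elif a > b:
--             i += 1
--         else:
--             j += 1
--     if not out:
--         return "-1"
--     if all(c == '0' for c in out):
--         return "0"
--     return ''.join(out)
-- ===== Notes on version B (the rewrite author's own statement) =====
-- stated objective: alternative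
-- what changed: B sorts both strings descending once and extracts the shared multiset with a two-pointer merge scan (output already in final order), instead of A's per-distinct-character loop that repeatedly calls count and destructively rewrites Y with replace and then re-sorts the answer.
import Mathlib
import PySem

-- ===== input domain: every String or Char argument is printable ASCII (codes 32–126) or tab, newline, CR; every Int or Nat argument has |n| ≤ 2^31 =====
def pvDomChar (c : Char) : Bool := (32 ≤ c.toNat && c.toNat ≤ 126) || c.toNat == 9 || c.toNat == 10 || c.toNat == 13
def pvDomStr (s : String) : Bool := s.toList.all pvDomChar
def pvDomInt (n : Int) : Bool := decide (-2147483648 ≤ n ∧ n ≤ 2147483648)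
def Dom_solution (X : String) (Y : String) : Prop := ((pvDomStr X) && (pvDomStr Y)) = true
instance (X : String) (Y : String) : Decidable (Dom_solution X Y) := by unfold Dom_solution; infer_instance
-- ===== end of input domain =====

-- B sorts both strings descending once and extracts the shared multiset with a two-pointer merge
-- scan (output already in final order), replacing A's count/replace loop; objective: alternative.
-- Return-value equivalence only.

-- ===== PORT A =====
-- hand port of Y.replace(i, "", n) for a ONE-CHARACTER pattern and empty replacement:
-- drop the first n occurrences of c (exact for this special case of str.replace)
def pvRemoveCount : List Char → Char → Nat → List Char
  | [], _, _ => []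
  | x :: t, c, n =>
    match n with
    | 0 => x :: t
    | Nat.succ m => if x = c then pvRemoveCount t c m else x :: pvRemoveCount t c (Nat.succ m)

-- the body of A's for-loop; state = (answer, current Y)
def pvStepA (xs : List Char) (st : List Char × List Char) (i : Char) : List Char × List Char :=
  if PySem.Chars.isIn [i] st.2 then
    let cc := min (PySem.Chars.count xs [i]) (PySem.Chars.count st.2 [i])
    (st.1 ++ List.replicate cc i, pvRemoveCount st.2 i cc)
  else st

def solution (X : String) (Y : String) : String :=
  let xs := X.toList
  let loop := (PySem.List.sorted (PySem.Set.ofList xs) (fun c => c) true).foldl (pvStepA xs) ([], Y.toList)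
  let answer := loop.1
  if answer = [] then "-1"
  else if answer.all (fun c => c == '0') then "0"
  else String.mk (PySem.List.sorted answer (fun c => c) true)

-- ===== PORT B =====
-- the two-pointer while loop: both lists sorted descending, advance past the larger head,
-- emit a character when the heads agree
def pvMerge : List Char → List Char → List Char
  | [], _ => []
  | _ :: _, [] => []
  | a :: tx, b :: ty =>
    if a = b then a :: pvMerge tx ty
    else if b < a then pvMerge tx (b :: ty)
    else pvMerge (a :: tx) ty
termination_by xs ys => xs.length + ys.length

def solution_alt (X : String) (Y : String) : String :=
  let xs := PySem.List.sorted X.toList (fun c => c) true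
  let ys := PySem.List.sorted Y.toList (fun c => c) true
  let out := pvMerge xs ys
  if out = [] then "-1"
  else if out.all (fun c => c == '0') then "0"
  else String.mk out

-- ===== PRECONDITION & SPEC =====
def Spec_solution (X : String) (Y : String) (out : String) : Prop := out = solution_alt X Y
instance (X : String) (Y : String) (out : String) : Decidable (Spec_solution X Y out) := by unfold Spec_solution; infer_instance

-- ===== CLAIM (what is proved, stated in full; the proofs are below) =====
def Claim_equal_solution : Prop := ∀ (X : String) (Y : String), Dom_solution X Y → Spec_solution X Y (solution X Y)

-- ===== LEMMAS AND PROOFS =====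

-- the worker of s.count for a one-character pattern counts occurrences
theorem pv_count_go_singleton (c : Char) (fuel : Nat) : ∀ (l : List Char) (acc : Nat), l.length ≤ fuel →
    PySem.Chars.count.go [c] fuel l acc = acc + l.count c := by
  induction fuel with
  | zero =>
    intro l acc h
    rw [List.length_eq_zero_iff.mp (Nat.le_zero.mp h)]
    simp [PySem.Chars.count.go]
  | succ n ih =>
    intro l acc h
    cases l with
    | nil => simp [PySem.Chars.count.go]
    | cons x t =>
      simp only [PySem.Chars.count.go, List.isPrefixOf, List.length_cons]
      by_cases hx : c = x
      · subst hx
        simp only [beq_self_eq_true, Bool.true_and, if_pos]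
        simp only [List.length_nil, Nat.zero_add, List.drop_one, List.tail_cons]
        rw [ih t (acc + 1) (by simpa using h)]
        simp only [List.count_cons_self]
        omega
      · have : (c == x) = false := by simp [hx]
        simp only [this, Bool.false_and, Bool.false_eq_true, if_false]
        rw [ih t acc (by simpa using h)]
        simp [Ne.symm hx]

-- s.count(c) for a single character is the list count
theorem pv_count_singleton (l : List Char) (c : Char) : PySem.Chars.count l [c] = l.count c := by
  simp only [PySem.Chars.count, List.isEmpty_cons, Bool.false_eq_true, if_false]
  rw [pv_count_go_singleton c l.length l 0 le_rfl, Nat.zero_add]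

-- 'c in s' for a single character is membership
theorem pv_isIn_singleton (l : List Char) (c : Char) : PySem.Chars.isIn [c] l = true ↔ c ∈ l := by
  rw [PySem.Chars.isIn_iff_infix]; exact List.singleton_infix_iff c l

-- removing occurrences of c leaves the count of every other character unchanged
theorem pv_removeCount_count_ne (l : List Char) (c d : Char) (h : d ≠ c) : ∀ (n : Nat),
    (pvRemoveCount l c n).count d = l.count d := by
  induction l with
  | nil => intro n; rfl
  | cons x t ih =>
    intro n
    cases n with
    | zero => rfl
    | succ m =>
      simp only [pvRemoveCount]
      by_cases hx : x = c
      · rw [if_pos hx, ih m, List.count_cons]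
        simp [hx, Ne.symm h]
      · rw [if_neg hx]
        simp [List.count_cons, ih (m + 1)]

-- characterisation of A's loop: the answer accumulates min-counts measured against the ORIGINAL Y
theorem pv_loopA (xs : List Char) (L : List Char) : ∀ (ans y Y0 : List Char),
    L.Nodup → (∀ c ∈ L, y.count c = Y0.count c) →
    (L.foldl (pvStepA xs) (ans, y)).1
      = ans ++ L.flatMap (fun i => List.replicate (min (xs.count i) (Y0.count i)) i) := by
  induction L with
  | nil => intro ans y Y0 _ _; simp
  | cons i L ih =>
    intro ans y Y0 hnd hy
    have hnotmem : i ∉ L := (List.nodup_cons.mp hnd).1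
    have hndL : L.Nodup := (List.nodup_cons.mp hnd).2
    have hyi : y.count i = Y0.count i := hy i (List.mem_cons_self)
    simp only [List.foldl_cons, List.flatMap_cons]
    by_cases hin : PySem.Chars.isIn [i] y = true
    · have hstep : pvStepA xs (ans, y) i
          = (ans ++ List.replicate (min (xs.count i) (Y0.count i)) i,
             pvRemoveCount y i (min (xs.count i) (Y0.count i))) := by
        simp only [pvStepA, hin, if_pos]
        rw [pv_count_singleton, pv_count_singleton, hyi]
      rw [hstep, ih _ _ Y0 hndL ?_]
      · rw [List.append_assoc]
      · intro c hc
        rw [pv_removeCount_count_ne y i c (fun he => hnotmem (he ▸ hc)) _]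
        exact hy c (List.mem_cons_of_mem _ hc)
    · have hzero : y.count i = 0 := by
        rw [List.count_eq_zero]
        intro hmem
        exact hin ((pv_isIn_singleton y i).mpr hmem)
      have hstep : pvStepA xs (ans, y) i = (ans, y) := by
        simp only [pvStepA]
        rw [if_neg (by simp [hin])]
      rw [hstep, ih ans y Y0 hndL (fun c hc => hy c (List.mem_cons_of_mem _ hc))]
      rw [← hyi, hzero]
      simp

-- count of A's flattened answer over a nodup key list
theorem pv_count_flatMap (xs ys : List Char) (L : List Char) (hnd : L.Nodup) (c : Char) :
    (L.flatMap (fun i => List.replicate (min (xs.count i) (ys.count i)) i)).count c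
      = if c ∈ L then min (xs.count c) (ys.count c) else 0 := by
  induction L with
  | nil => simp
  | cons i L ih =>
    have hnotmem : i ∉ L := (List.nodup_cons.mp hnd).1
    have hndL : L.Nodup := (List.nodup_cons.mp hnd).2
    simp only [List.flatMap_cons, List.count_append, List.count_replicate, ih hndL]
    by_cases hc : c = i
    · subst hc
      simp [hnotmem]
    · have h2 : (i == c) = false := by simp [Ne.symm hc]
      simp [h2, List.mem_cons, hc]

-- the merge output is a sublist of its left argument
theorem pvMerge_sublist (xs ys : List Char) : (pvMerge xs ys).Sublist xs := by
  fun_induction pvMerge xs ys with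
  | case1 ys => exact List.Sublist.refl []
  | case2 a tx => exact List.nil_sublist _
  | case3 tx a ty ih => exact List.Sublist.cons₂ a ih
  | case4 a tx b ty heq hlt ih => exact ih.cons a
  | case5 a tx b ty heq hlt ih => exact ih

-- in a descending list every element is at most the head
theorem pv_desc_count_gt (y : Char) (ty : List Char) (h : (y :: ty).Pairwise (fun a b => b ≤ a))
    (c : Char) (hc : y < c) : (y :: ty).count c = 0 := by
  rw [List.count_eq_zero]
  intro hmem
  rcases List.mem_cons.mp hmem with h1 | h2
  · exact absurd h1.symm (ne_of_lt hc)
  · exact absurd ((List.pairwise_cons.mp h).1 c h2) (not_le.mpr hc)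

-- the merge of two descending lists realises the min count for every character
theorem pvMerge_count (xs ys : List Char) (hx : xs.Pairwise (fun a b => b ≤ a))
    (hy : ys.Pairwise (fun a b => b ≤ a)) (c : Char) :
    (pvMerge xs ys).count c = min (xs.count c) (ys.count c) := by
  fun_induction pvMerge xs ys with
  | case1 ys => simp
  | case2 a tx => simp
  | case3 tx a ty ih =>
    have := ih (List.pairwise_cons.mp hx).2 (List.pairwise_cons.mp hy).2
    by_cases hc : c = a
    · subst hc
      simp only [List.count_cons_self, this]
      omega
    · have hne : (a == c) = false := by simp [Ne.symm hc]
      simp only [List.count_cons, hne, this]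
      omega
  | case4 a tx b ty heq hlt ih =>
    have := ih (List.pairwise_cons.mp hx).2 hy
    by_cases hc : c = a
    · subst hc
      have h0 : (b :: ty).count c = 0 := pv_desc_count_gt b ty hy c hlt
      rw [this, h0]
      omega
    · have hne : (a == c) = false := by simp [Ne.symm hc]
      rw [this]
      simp [List.count_cons, hne]
  | case5 a tx b ty heq hlt ih =>
    have := ih hx (List.pairwise_cons.mp hy).2
    have hblt : a < b := lt_of_le_of_ne (not_lt.mp hlt) heq
    by_cases hc : c = b
    · subst hc
      have h0 : (a :: tx).count c = 0 := pv_desc_count_gt a tx hx c hblt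
      rw [this, h0]
      omega
    · have hne : (b == c) = false := by simp [Ne.symm hc]
      rw [this]
      simp [List.count_cons, hne]

-- A's answer list and B's merge output are permutations of each other
theorem pv_perm (xs ys : List Char) :
    ((PySem.List.sorted (PySem.Set.ofList xs) (fun c => c) true).flatMap
        (fun i => List.replicate (min (xs.count i) (ys.count i)) i)).Perm
      (pvMerge (PySem.List.sorted xs (fun c => c) true) (PySem.List.sorted ys (fun c => c) true)) := by
  have hnd : (PySem.List.sorted (PySem.Set.ofList xs) (fun c => c) true).Nodup :=
    ((PySem.List.sorted_perm (PySem.Set.ofList xs) (fun c => c) true).nodup_iff).mpr (PySem.Set.nodup_ofList xs)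
  refine List.perm_iff_count.mpr (fun c => ?_)
  rw [pv_count_flatMap xs ys _ hnd c,
    pvMerge_count _ _ (PySem.List.sorted_pairwise_rev xs (fun c => c))
      (PySem.List.sorted_pairwise_rev ys (fun c => c)) c]
  rw [(PySem.List.sorted_perm xs (fun c => c) true).count_eq,
    (PySem.List.sorted_perm ys (fun c => c) true).count_eq]
  by_cases hmem : c ∈ PySem.List.sorted (PySem.Set.ofList xs) (fun c => c) true
  · rw [if_pos hmem]
  · rw [if_neg hmem]
    have hnx : c ∉ xs := by
      intro hx
      exact hmem (((PySem.List.mem_sorted _ _ _) c).mpr ((PySem.Set.mem_ofList xs c).mpr hx))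
    rw [List.count_eq_zero.mpr hnx]
    simp

-- the two if-chains agree
theorem pv_chain (xs ys : List Char) :
    (if (List.foldl (pvStepA xs) ([], ys) (PySem.List.sorted (PySem.Set.ofList xs) (fun c => c) true)).1 = [] then ("-1" : String)
      else if ((List.foldl (pvStepA xs) ([], ys) (PySem.List.sorted (PySem.Set.ofList xs) (fun c => c) true)).1.all fun c => c == '0') = true then "0"
      else String.mk (PySem.List.sorted (List.foldl (pvStepA xs) ([], ys) (PySem.List.sorted (PySem.Set.ofList xs) (fun c => c) true)).1 (fun c => c) true))
      = (if pvMerge (PySem.List.sorted xs (fun c => c) true) (PySem.List.sorted ys (fun c => c) true) = [] then "-1"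
      else if ((pvMerge (PySem.List.sorted xs (fun c => c) true) (PySem.List.sorted ys (fun c => c) true)).all fun c => c == '0') = true then "0"
      else String.mk (pvMerge (PySem.List.sorted xs (fun c => c) true) (PySem.List.sorted ys (fun c => c) true))) := by
  have hnd : (PySem.List.sorted (PySem.Set.ofList xs) (fun c => c) true).Nodup :=
    ((PySem.List.sorted_perm (PySem.Set.ofList xs) (fun c => c) true).nodup_iff).mpr (PySem.Set.nodup_ofList xs)
  have hA : (List.foldl (pvStepA xs) ([], ys) (PySem.List.sorted (PySem.Set.ofList xs) (fun c => c) true)).1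
      = (PySem.List.sorted (PySem.Set.ofList xs) (fun c => c) true).flatMap
          (fun i => List.replicate (min (xs.count i) (ys.count i)) i) := by
    simpa using pv_loopA xs (PySem.List.sorted (PySem.Set.ofList xs) (fun c => c) true) [] ys ys hnd (fun c _ => rfl)
  rw [hA]
  have hperm := pv_perm xs ys
  set ans := (PySem.List.sorted (PySem.Set.ofList xs) (fun c => c) true).flatMap
      (fun i => List.replicate (min (xs.count i) (ys.count i)) i) with hans
  set out := pvMerge (PySem.List.sorted xs (fun c => c) true) (PySem.List.sorted ys (fun c => c) true) with hout
  by_cases h1 : ans = []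
  · have h1' : out = [] := by
      have hp := hperm
      rw [h1] at hp
      exact hp.symm.eq_nil
    rw [if_pos h1, if_pos h1']
  · have h2 : out ≠ [] := by
      intro h
      apply h1
      have hp := hperm
      rw [h] at hp
      exact hp.eq_nil
    rw [if_neg h1, if_neg h2]
    have hall : ans.all (fun c => c == '0') = out.all (fun c => c == '0') := by
      apply Bool.eq_iff_iff.mpr
      rw [List.all_eq_true, List.all_eq_true]
      exact ⟨fun h x hx => h x (hperm.mem_iff.mpr hx), fun h x hx => h x (hperm.mem_iff.mp hx)⟩
    rw [hall]
    by_cases hz : out.all (fun c => c == '0') = true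
    · rw [if_pos hz, if_pos hz]
    · rw [if_neg hz, if_neg hz]
      congr 1
      refine List.Perm.eq_of_pairwise (fun a b _ _ ha hb => le_antisymm hb ha)
        (PySem.List.sorted_pairwise_rev _ (fun c => c)) ?_ ?_
      · exact List.Pairwise.sublist (pvMerge_sublist _ _) (PySem.List.sorted_pairwise_rev xs (fun c => c))
      · exact ((PySem.List.sorted_perm ans (fun c => c) true).trans hperm)

-- ===== VERDICT (by name: the statement is the Claim_ definition above) =====
theorem solution_spec : Claim_equal_solution := by
  unfold Claim_equal_solution
  intro X Y _
  simp only [Spec_solution, solution, solution_alt]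
  exact pv_chain X.toList Y.toList
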